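-- pv_equiv track=rewrite | github.com/DigiZiggy/Python | EX07A/popular_names.py | to_sex_dicts
-- ===== SOURCE A (Python) =====
-- def to_sex_dicts(names_dict: dict) -> tuple:
--     """
--     Divide the names by sex to 2 different dictionaries.
--
--     :param names_dict: dictionary of names
--     :return: two dictionaries {"name": number}, {"name": number}
--     first one is male names, seconds is female names.
--     """
--     males = [k for k, v in names_dict.items() if ':M' in k]
--     male_values = [v for k, v in names_dict.items() if ':M' in k]
--     male_keys = []
--     for name in males:
--         male_keys.append(name.split(':')[0])
--     male_names = dict(zip(male_keys, male_values))
--     females = [k for k, v in names_dict.items() if ':F' in k]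
--     values = [v for k, v in names_dict.items() if ':F' in k]
--     female_keys = []
--     for name in females:
--         female_keys.append(name.split(':')[0])
--     female_names = dict(zip(female_keys, values))
--     return male_names, female_names
-- ===== SOURCE B (Python) =====
-- def to_sex_dicts(names_dict: dict) -> tuple:
--     """Divide the names by sex into two dictionaries (male, female) in one pass."""
--     male_names = {}
--     female_names = {}
--     for k, v in names_dict.items():
--         if ':M' in k:
--             male_names[k.split(':')[0]] = v
--         if ':F' in k:
--             female_names[k.split(':')[0]] = v
--     return male_names, female_names
-- ===== Notes on version B (the rewrite author's own statement) =====
-- stated objective: simpler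
-- what changed: One pass over items() maintaining both result dicts directly, instead of four list comprehensions, two key-rebuilding loops and two dict(zip(...)) reconstructions.
import Mathlib
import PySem

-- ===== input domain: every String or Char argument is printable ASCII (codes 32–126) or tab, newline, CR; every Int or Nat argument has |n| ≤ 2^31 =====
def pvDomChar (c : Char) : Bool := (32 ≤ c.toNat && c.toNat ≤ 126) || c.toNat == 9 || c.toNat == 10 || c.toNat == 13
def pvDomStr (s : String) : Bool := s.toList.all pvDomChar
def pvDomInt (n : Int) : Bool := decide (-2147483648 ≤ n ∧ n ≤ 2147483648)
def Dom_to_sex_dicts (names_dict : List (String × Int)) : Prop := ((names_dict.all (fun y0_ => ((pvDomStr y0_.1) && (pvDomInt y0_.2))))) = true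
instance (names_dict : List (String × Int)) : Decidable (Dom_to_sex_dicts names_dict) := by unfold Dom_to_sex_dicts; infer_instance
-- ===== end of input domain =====

-- B is one pass over the items maintaining both result dicts, replacing A's comprehensions + rebuild loops + dict(zip) (objective: simpler).

-- shared helper: name.split(':')[0].  ':' is a nonempty separator, so split? is
-- always `some` of a nonempty list and the [0] indexing never raises.
def pvKeyOf (s : String) : String := ((PySem.Str.split? s ":").getD []).headD ""

-- ===== PORT A =====
def to_sex_dicts (names_dict : List (String × Int)) : (List (String × Int)) × (List (String × Int)) :=
  let males := (names_dict.filter (fun p => PySem.Str.isIn ":M" p.1)).map (·.1)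
  let male_values := (names_dict.filter (fun p => PySem.Str.isIn ":M" p.1)).map (·.2)
  let male_keys := males.foldl (fun acc name => acc ++ [pvKeyOf name]) []
  let male_names : PySem.Dict String Int := PySem.Dict.ofList (male_keys.zip male_values)
  let females := (names_dict.filter (fun p => PySem.Str.isIn ":F" p.1)).map (·.1)
  let values := (names_dict.filter (fun p => PySem.Str.isIn ":F" p.1)).map (·.2)
  let female_keys := females.foldl (fun acc name => acc ++ [pvKeyOf name]) []
  let female_names : PySem.Dict String Int := PySem.Dict.ofList (female_keys.zip values)
  (male_names.items, female_names.items)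

-- ===== PORT B =====
def to_sex_dicts_alt (names_dict : List (String × Int)) : (List (String × Int)) × (List (String × Int)) :=
  let mf := names_dict.foldl
    (fun (mf : PySem.Dict String Int × PySem.Dict String Int) kv =>
      ((if PySem.Str.isIn ":M" kv.1 then mf.1.insert (pvKeyOf kv.1) kv.2 else mf.1),
       (if PySem.Str.isIn ":F" kv.1 then mf.2.insert (pvKeyOf kv.1) kv.2 else mf.2)))
    (PySem.Dict.empty, PySem.Dict.empty)
  (mf.1.items, mf.2.items)

-- ===== PRECONDITION & SPEC =====
def Spec_to_sex_dicts (names_dict : List (String × Int)) (out : (List (String × Int)) × (List (String × Int))) : Prop := out = to_sex_dicts_alt names_dict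
instance (names_dict : List (String × Int)) (out : (List (String × Int)) × (List (String × Int))) : Decidable (Spec_to_sex_dicts names_dict out) := by unfold Spec_to_sex_dicts; infer_instance

-- ===== CLAIM (what is proved, stated in full; the proofs are below) =====
def Claim_equal_to_sex_dicts : Prop := ∀ (names_dict : List (String × Int)), Dom_to_sex_dicts names_dict → Spec_to_sex_dicts names_dict (to_sex_dicts names_dict)

-- ===== LEMMAS AND PROOFS =====

-- B's fold over the pair of dicts splits into one fold per dict (the components are updated independently)
theorem pv_foldl_pair (l : List (String × Int)) (a b : PySem.Dict String Int) :
    l.foldl (fun (mf : PySem.Dict String Int × PySem.Dict String Int) kv =>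
        ((if PySem.Str.isIn ":M" kv.1 then mf.1.insert (pvKeyOf kv.1) kv.2 else mf.1),
         (if PySem.Str.isIn ":F" kv.1 then mf.2.insert (pvKeyOf kv.1) kv.2 else mf.2))) (a, b)
    = (l.foldl (fun d kv => if PySem.Str.isIn ":M" kv.1 then d.insert (pvKeyOf kv.1) kv.2 else d) a,
       l.foldl (fun d kv => if PySem.Str.isIn ":F" kv.1 then d.insert (pvKeyOf kv.1) kv.2 else d) b) := by
  induction l generalizing a b with
  | nil => rfl
  | cons x xs ih => simp only [List.foldl_cons]; exact ih _ _

-- the append-accumulating loop is a map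
theorem pv_foldl_append_map {α β : Type} (f : α → β) (l : List α) (acc : List β) :
    l.foldl (fun acc x => acc ++ [f x]) acc = acc ++ l.map f := by
  induction l generalizing acc with
  | nil => simp
  | cons x xs ih => simp [List.foldl_cons, ih]

-- zipping the mapped keys with the mapped values of the SAME list pairs them position-wise
theorem pv_zip_map_map {α β γ : Type} (f : α → β) (g : α → γ) (l : List α) :
    (l.map f).zip (l.map g) = l.map (fun x => (f x, g x)) := by
  induction l with
  | nil => rfl
  | cons x xs ih => simp [ih]

-- one sex's dict in A equals the corresponding single fold over the whole list
theorem pv_side (pred : String → Bool) (l : List (String × Int)) (d : PySem.Dict String Int) :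
    ((l.filter (fun p => pred p.1)).map (fun kv => (pvKeyOf kv.1, kv.2))).foldl
        (fun acc p => acc.insert p.1 p.2) d
    = l.foldl (fun d kv => if pred kv.1 then d.insert (pvKeyOf kv.1) kv.2 else d) d := by
  induction l generalizing d with
  | nil => rfl
  | cons x xs ih =>
    by_cases h : pred x.1 <;> simp [h, ih]

theorem to_sex_dicts_eq (names_dict : List (String × Int)) :
    to_sex_dicts names_dict = to_sex_dicts_alt names_dict := by
  unfold to_sex_dicts to_sex_dicts_alt
  rw [pv_foldl_pair]
  simp only [pv_foldl_append_map, List.nil_append, List.map_map, Function.comp,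
    pv_zip_map_map, PySem.Dict.ofList, PySem.Dict.update, pv_side]

-- ===== VERDICT (by name: the statement is the Claim_ definition above) =====
theorem to_sex_dicts_spec : Claim_equal_to_sex_dicts := by
  intro nd _
  exact (to_sex_dicts_eq nd).symm ▸ rfl
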